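-- pv_equiv track=rewrite | github.com/rtreit/bookcatalog | bookcatalog/research/local_search.py | _tokenize_for_fts
-- ===== SOURCE A (Python) =====
-- _NOISE_WORDS = frozenset({
--     "by", "the", "a", "an", "of", "and", "in", "to", "for", "on",
--     "with", "at", "from", "or", "is", "it", "as", "be", "was",
-- })
--
-- def _tokenize_for_fts(text: str) -> list[str]:
--     """Extract useful tokens from text for FTS5 queries.
--
--     Removes punctuation, noise words, and short tokens.
--
--     Args:
--         text: Raw search string.
--
--     Returns:
--         List of clean tokens suitable for FTS5.
--     """
--     cleaned = ""
--     for ch in text: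
--         if ch.isalnum() or ch == " ":
--             cleaned += ch
--         else:
--             cleaned += " "
--
--     tokens = cleaned.split()
--     useful = [t for t in tokens if t.lower() not in _NOISE_WORDS and len(t) > 1]
--     if not useful:
--         useful = tokens
--     return useful
-- ===== SOURCE B (Python) =====
-- _NOISE_WORDS = frozenset(
--     "by the a an of and in to for on with at from or is it as be was".split()
-- )
--
--
-- def _tokenize_for_fts(text: str) -> list[str]:
--     # Index-based scan: find each maximal alphanumeric run by advancing two indices
--     # and slicing it out, filtering into `useful` on the fly (no cleaned string, no split).
--     tokens = []
--     useful = []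
--     i, n = 0, len(text)
--     while i < n:
--         if not text[i].isalnum():
--             i += 1
--             continue
--         j = i
--         while j < n and text[j].isalnum():
--             j += 1
--         tok = text[i:j]
--         tokens.append(tok)
--         if len(tok) > 1 and tok.lower() not in _NOISE_WORDS:
--             useful.append(tok)
--         i = j
--     return useful if useful else tokens
-- ===== Notes on version B (the rewrite author's own statement) =====
-- stated objective: alternative
-- what changed: B drops A's three-stage pipeline (build a cleaned string, str.split it, then a separate filter pass): it scans the input once with two indices, slicing out each maximal alphanumeric run and appending it to tokens and, when it passes the noise/length test, to useful, keeping the same unfiltered fallback.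
import Mathlib
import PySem

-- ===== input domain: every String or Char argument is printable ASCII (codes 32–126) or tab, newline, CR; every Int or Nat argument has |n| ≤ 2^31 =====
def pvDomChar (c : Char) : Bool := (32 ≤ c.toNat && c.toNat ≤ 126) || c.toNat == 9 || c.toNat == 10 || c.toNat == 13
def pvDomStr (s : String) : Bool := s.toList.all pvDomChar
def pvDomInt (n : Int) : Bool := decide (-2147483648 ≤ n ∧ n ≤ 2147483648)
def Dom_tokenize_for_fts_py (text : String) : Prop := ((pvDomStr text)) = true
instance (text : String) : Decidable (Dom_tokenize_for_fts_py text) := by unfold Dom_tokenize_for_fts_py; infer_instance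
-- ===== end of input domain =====

-- B replaces A's build-cleaned-string-then-split-then-filter pipeline by a single index scan
-- that slices out each maximal alphanumeric run and filters it on the fly (objective:
-- alternative decomposition, same cost).

-- ===== PORT A =====
-- A-side: the module constant _NOISE_WORDS
def noiseWords : List (List Char) :=
  ["by".toList, "the".toList, "a".toList, "an".toList, "of".toList, "and".toList,
   "in".toList, "to".toList, "for".toList, "on".toList, "with".toList, "at".toList,
   "from".toList, "or".toList, "is".toList, "it".toList, "as".toList, "be".toList,
   "was".toList]

-- A-side filter: [t for t in tokens if t.lower() not in _NOISE_WORDS and len(t) > 1]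
def usefulFilter (t : List Char) : Bool :=
  !(noiseWords.contains (PySem.Chars.lower t)) && decide (t.length > 1)

def tokenize_for_fts_py (text : String) : List String :=
  -- cleaned = ""; for ch in text: cleaned += ch if ch.isalnum() or ch == " " else " "
  let cleaned : List Char :=
    text.toList.foldl
      (fun acc ch => acc ++ [if PySem.Chars.isalnum ch || ch == ' ' then ch else ' ']) []
  -- tokens = cleaned.split()
  let tokens : List (List Char) := PySem.Chars.split₀ cleaned
  let useful := tokens.filter usefulFilter
  (if useful.isEmpty then tokens else useful).map String.ofList

-- ===== PORT B =====
-- B-side: Source B's _NOISE_WORDS = frozenset("by the a an … was".split())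
def altNoise : List (List Char) :=
  PySem.Chars.split₀
    "by the a an of and in to for on with at from or is it as be was".toList

-- Source B's inline condition: len(tok) > 1 and tok.lower() not in _NOISE_WORDS
def altKeep (t : List Char) : Bool :=
  decide (t.length > 1) && !(altNoise.contains (PySem.Chars.lower t))

-- Source B's outer while loop: skip a non-alnum char, or slice out the maximal alnum run
-- text[i:j] (the inner 'while j < n and text[j].isalnum()' + slice = takeWhile/dropWhile),
-- appending to tokens and, when the condition holds, to useful.
def altScan : List Char → (List (List Char)) × (List (List Char))
  | [] => ([], [])
  | c :: rest =>
      if PySem.Chars.isalnum c then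
        let tok := c :: rest.takeWhile PySem.Chars.isalnum
        let p := altScan (rest.dropWhile PySem.Chars.isalnum)
        (tok :: p.1, if altKeep tok then tok :: p.2 else p.2)
      else altScan rest
  termination_by s => s.length
  decreasing_by
    · have := List.length_dropWhile_le PySem.Chars.isalnum rest
      simp; omega
    · simp

def tokenize_for_fts_py_alt (text : String) : List String :=
  let p := altScan text.toList
  (if p.2.isEmpty then p.1 else p.2).map String.ofList

-- ===== PRECONDITION & SPEC =====
def Spec_tokenize_for_fts_py (text : String) (out : List String) : Prop := out = tokenize_for_fts_py_alt text
instance (text : String) (out : List String) : Decidable (Spec_tokenize_for_fts_py text out) := by unfold Spec_tokenize_for_fts_py; infer_instance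

-- ===== CLAIM (what is proved, stated in full; the proofs are below) =====
def Claim_equal_tokenize_for_fts_py : Prop := ∀ (text : String), Dom_tokenize_for_fts_py text → Spec_tokenize_for_fts_py text (tokenize_for_fts_py text)

-- ===== LEMMAS AND PROOFS =====

-- reference form of the tokenization: maximal alnum runs
def runs : List Char → List (List Char)
  | [] => []
  | c :: rest =>
      if PySem.Chars.isalnum c then
        (c :: rest.takeWhile PySem.Chars.isalnum) :: runs (rest.dropWhile PySem.Chars.isalnum)
      else runs rest
  termination_by s => s.length
  decreasing_by
    · have := List.length_dropWhile_le PySem.Chars.isalnum rest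
      simp; omega
    · simp

theorem isalnum_not_isspace (c : Char) (h : PySem.Chars.isalnum c = true) :
    PySem.Chars.isspace c = false := by
  simp only [PySem.Chars.isalnum, PySem.Chars.isalpha, PySem.Chars.isdigit,
    PySem.Chars.isupper, PySem.Chars.islower, Bool.or_eq_true, Bool.and_eq_true,
    decide_eq_true_eq, Char.le_def, UInt32.le_iff_toNat_le] at h
  simp only [PySem.Chars.isspace, Bool.or_eq_false_iff, Bool.and_eq_false_iff,
    decide_eq_false_iff_not, Char.toNat]
  have h0 : ('0' : Char).val.toNat = 48 := rfl
  have h9 : ('9' : Char).val.toNat = 57 := rfl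
  have hA : ('A' : Char).val.toNat = 65 := rfl
  have hZ : ('Z' : Char).val.toNat = 90 := rfl
  have ha : ('a' : Char).val.toNat = 97 := rfl
  have hz : ('z' : Char).val.toNat = 122 := rfl
  omega

theorem cleaned_char (c : Char) :
    (if PySem.Chars.isalnum c || c == ' ' then c else ' ') =
      (if PySem.Chars.isalnum c then c else ' ') := by
  by_cases h : PySem.Chars.isalnum c = true
  · simp [h]
  · by_cases hs : c = ' ' <;> simp [h, hs]

theorem foldl_append_map (f : Char → Char) (s acc : List Char) :
    s.foldl (fun a c => a ++ [f c]) acc = acc ++ s.map f := by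
  induction s generalizing acc with
  | nil => simp
  | cons c rest ih => simp [List.foldl, ih]

-- A's split of the cleaned string computes exactly the maximal alnum runs of the original
theorem go_cleaned (s cur : List Char) (acc : List (List Char)) :
    PySem.Chars.split₀.go (s.map (fun c => if PySem.Chars.isalnum c then c else ' ')) cur acc =
      acc.reverse ++
        (if cur.isEmpty then runs s
         else (cur.reverse ++ s.takeWhile PySem.Chars.isalnum) ::
                runs (s.dropWhile PySem.Chars.isalnum)) := by
  induction s generalizing cur acc with
  | nil =>
    cases cur <;> simp [PySem.Chars.split₀.go, runs]
  | cons c rest ih =>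
    by_cases h : PySem.Chars.isalnum c = true
    · have hns := isalnum_not_isspace c h
      simp only [List.map_cons, h, if_pos, PySem.Chars.split₀.go, hns]
      rw [if_neg (by simp)]
      rw [ih (c :: cur) acc]
      cases cur <;> simp [runs, h]
    · simp only [List.map_cons, h, if_false, Bool.false_eq_true]
      rw [show PySem.Chars.split₀.go (' ' :: rest.map _) cur acc =
            if (PySem.Chars.isspace ' ') = true then
              (if cur.isEmpty then PySem.Chars.split₀.go (rest.map (fun c => if PySem.Chars.isalnum c then c else ' ')) [] acc
               else PySem.Chars.split₀.go (rest.map (fun c => if PySem.Chars.isalnum c then c else ' ')) [] (cur.reverse :: acc))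
            else PySem.Chars.split₀.go (rest.map (fun c => if PySem.Chars.isalnum c then c else ' ')) (' ' :: cur) acc
          from rfl]
      rw [if_pos (by decide)]
      cases cur with
      | nil => simp [ih [] acc, runs, h]
      | cons d ds =>
        simp only [List.isEmpty_cons]
        rw [ih [] (((d :: ds).reverse) :: acc)]
        simp [runs, h]

theorem tokens_eq (s : List Char) :
    PySem.Chars.split₀
        (s.foldl (fun a c => a ++ [if PySem.Chars.isalnum c || c == ' ' then c else ' ']) []) =
      runs s := by
  simp only [cleaned_char]
  rw [foldl_append_map, List.nil_append, PySem.Chars.split₀]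
  cases s with
  | nil => simp [PySem.Chars.split₀.go, runs]
  | cons c rest =>
    rw [show (c :: rest).map (fun c => if PySem.Chars.isalnum c then c else ' ') =
          ((if PySem.Chars.isalnum c then c else ' ') :: rest.map (fun c => if PySem.Chars.isalnum c then c else ' ')) from rfl]
    by_cases h : PySem.Chars.isalnum c = true
    · have hns := isalnum_not_isspace c h
      simp only [h, if_true]
      rw [show PySem.Chars.split₀.go (c :: rest.map _) [] [] =
            (if PySem.Chars.isspace c = true then PySem.Chars.split₀.go (rest.map (fun c => if PySem.Chars.isalnum c then c else ' ')) [] []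
             else PySem.Chars.split₀.go (rest.map (fun c => if PySem.Chars.isalnum c then c else ' ')) [c] []) from rfl]
      rw [if_neg (by simp [hns]), go_cleaned]
      simp [runs, h]
    · simp only [h, Bool.false_eq_true, if_false]
      rw [show PySem.Chars.split₀.go (' ' :: rest.map _) [] [] =
            (if PySem.Chars.isspace ' ' = true then PySem.Chars.split₀.go (rest.map (fun c => if PySem.Chars.isalnum c then c else ' ')) [] []
             else PySem.Chars.split₀.go (rest.map (fun c => if PySem.Chars.isalnum c then c else ' ')) [' '] []) from rfl]
      rw [if_pos (by decide), go_cleaned]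
      simp [runs, h]

-- the literals are the same set of words in the same order
theorem noise_eq : altNoise = noiseWords := by decide

theorem filter_eq (t : List Char) : usefulFilter t = altKeep t := by
  simp [usefulFilter, altKeep, noise_eq, Bool.and_comm]

-- B's single scan computes the runs together with their filtered sublist
theorem altScan_eq (s : List Char) :
    altScan s = (runs s, (runs s).filter usefulFilter) := by
  induction s using altScan.induct with
  | case1 => simp [altScan, runs]
  | case2 c rest h ih =>
    simp only [altScan, runs, h, if_true]
    rw [ih]
    simp only [List.filter, filter_eq]
    split <;> rename_i hk <;> simp [hk]
  | case3 c rest h ih =>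
    simp only [altScan, runs, h, Bool.false_eq_true, if_false]
    exact ih

-- ===== VERDICT (by name: the statement is the Claim_ definition above) =====
theorem tokenize_for_fts_py_spec : Claim_equal_tokenize_for_fts_py := by
  intro text _
  simp only [Spec_tokenize_for_fts_py, tokenize_for_fts_py, tokenize_for_fts_py_alt,
    tokens_eq, altScan_eq]
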